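-- pv_equiv track=rewrite | github.com/BasedHardware/omi | backend/tests/unit/test_pusher_batch_upload.py | _group_chunks_by_gap
-- ===== SOURCE A (Python) =====
-- def _group_chunks_by_gap(chunks, gap_threshold=90):
--     """Mirrors create_audio_files_from_chunks gap grouping from conversations.py."""
--     groups = []
--     current_group = []
--     for chunk in chunks:
--         if not current_group:
--             current_group.append(chunk)
--         else:
--             time_gap = chunk['timestamp'] - current_group[-1]['timestamp']
--             if time_gap > gap_threshold:
--                 groups.append(current_group)
--                 current_group = [chunk]
--             else:
--                 current_group.append(chunk)
--     if current_group:
--         groups.append(current_group)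
--     return groups
-- ===== SOURCE B (Python) =====
-- def _group_chunks_by_gap(chunks, gap_threshold=90):
--     # Build the groups back-to-front: walk the chunks in reverse and prepend
--     # each chunk to the first group when the gap to its head is small enough.
--     groups = []
--     for chunk in reversed(chunks):
--         if groups and groups[0][0]['timestamp'] - chunk['timestamp'] <= gap_threshold:
--             groups[0] = [chunk] + groups[0]
--         else:
--             groups = [[chunk]] + groups
--     return groups
-- ===== Notes on version B (the rewrite author's own statement) =====
-- stated objective: alternative
-- what changed: B builds the result back-to-front: it walks the chunks in reverse and prepends each chunk either onto the head of the first group (small gap) or as a new first group, replacing A's forward accumulator with a pending current_group and a final flush.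
import Mathlib
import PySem

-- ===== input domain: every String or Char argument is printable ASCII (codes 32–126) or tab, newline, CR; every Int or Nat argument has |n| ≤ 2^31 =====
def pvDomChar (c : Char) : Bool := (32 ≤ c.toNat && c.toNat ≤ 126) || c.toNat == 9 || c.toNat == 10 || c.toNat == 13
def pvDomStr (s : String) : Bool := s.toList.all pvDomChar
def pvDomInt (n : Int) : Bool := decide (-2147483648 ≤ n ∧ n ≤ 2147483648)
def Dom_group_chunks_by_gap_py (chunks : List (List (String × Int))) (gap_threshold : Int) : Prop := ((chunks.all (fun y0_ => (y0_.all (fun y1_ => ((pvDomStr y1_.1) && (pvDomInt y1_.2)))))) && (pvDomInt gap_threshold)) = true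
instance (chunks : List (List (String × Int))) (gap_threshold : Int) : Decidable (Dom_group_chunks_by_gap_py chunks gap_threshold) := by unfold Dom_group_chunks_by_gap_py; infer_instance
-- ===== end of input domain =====

-- B builds the groups back-to-front (reverse walk, prepending into the first group)
-- instead of A's forward accumulator with a pending current_group and final flush;
-- objective: alternative decomposition, same O(n) cost.

-- ===== PORT A =====
-- chunk['timestamp'] (both Pythons contain this expression); Pre_ guarantees the key is present
def pvTs (chunk : List (String × Int)) : Int :=
  ((PySem.Dict.mk chunk).get? "timestamp").getD 0

-- one iteration of A's for-loop over state (groups, current_group); current_group[-1] is pyGet? (-1)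
def pvStepA (g : Int) (st : List (List (List (String × Int))) × List (List (String × Int)))
    (chunk : List (String × Int)) : List (List (List (String × Int))) × List (List (String × Int)) :=
  if st.2 = [] then (st.1, st.2 ++ [chunk])
  else if pvTs chunk - pvTs ((PySem.List.pyGet? st.2 (-1)).getD []) > g then (st.1 ++ [st.2], [chunk])
  else (st.1, st.2 ++ [chunk])

def group_chunks_by_gap_py (chunks : List (List (String × Int))) (gap_threshold : Int) :
    List (List (List (String × Int))) :=
  let st := chunks.foldl (pvStepA gap_threshold) ([], [])
  if st.2 ≠ [] then st.1 ++ [st.2] else st.1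

-- ===== PORT B =====
-- one iteration of B's loop over reversed(chunks): merge into the first group or start a new one
def pvStepB (g : Int) (groups : List (List (List (String × Int))))
    (chunk : List (String × Int)) : List (List (List (String × Int))) :=
  match groups with
  | first :: rest =>
      if pvTs (first.headD []) - pvTs chunk ≤ g then (chunk :: first) :: rest
      else [chunk] :: first :: rest
  | [] => [[chunk]]

def group_chunks_by_gap_py_alt (chunks : List (List (String × Int))) (gap_threshold : Int) :
    List (List (List (String × Int))) :=
  chunks.reverse.foldl (pvStepB gap_threshold) []

-- ===== PRECONDITION & SPEC =====
-- Pre_ excludes exactly the inputs on which Python A raises KeyError: with two or more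
-- chunks, every chunk's 'timestamp' key is read, so all chunks must carry it.
def Pre_group_chunks_by_gap_py (chunks : List (List (String × Int))) (gap_threshold : Int) : Prop :=
  chunks.length ≤ 1 ∨ ∀ c ∈ chunks, ((PySem.Dict.mk c).get? "timestamp").isSome = true
instance (chunks : List (List (String × Int))) (gap_threshold : Int) : Decidable (Pre_group_chunks_by_gap_py chunks gap_threshold) := by unfold Pre_group_chunks_by_gap_py; infer_instance

def pvWitness_group_chunks_by_gap_py : (List (List (String × Int))) × Int :=
  ([[("timestamp", 0)], [("timestamp", 50)], [("timestamp", 200)]], 90)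

def Spec_group_chunks_by_gap_py (chunks : List (List (String × Int))) (gap_threshold : Int) (out : List (List (List (String × Int)))) : Prop := out = group_chunks_by_gap_py_alt chunks gap_threshold
instance (chunks : List (List (String × Int))) (gap_threshold : Int) (out : List (List (List (String × Int)))) : Decidable (Spec_group_chunks_by_gap_py chunks gap_threshold out) := by unfold Spec_group_chunks_by_gap_py; infer_instance

-- ===== CLAIM (what is proved, stated in full; the proofs are below) =====
def Claim_equal_group_chunks_by_gap_py : Prop := ∀ (chunks : List (List (String × Int))) (gap_threshold : Int), Dom_group_chunks_by_gap_py chunks gap_threshold → Pre_group_chunks_by_gap_py chunks gap_threshold → Spec_group_chunks_by_gap_py chunks gap_threshold (group_chunks_by_gap_py chunks gap_threshold)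

-- ===== LEMMAS AND PROOFS =====

-- A's loop only ever appends to the groups component: the start value factors out.
theorem pv_foldl_stepA_split (g : Int) (l : List (List (String × Int))) :
    ∀ (groups : List (List (List (String × Int)))) (cur : List (List (String × Int))),
      List.foldl (pvStepA g) (groups, cur) l =
        (groups ++ (List.foldl (pvStepA g) ([], cur) l).1,
         (List.foldl (pvStepA g) ([], cur) l).2) := by
  induction l with
  | nil => intro groups cur; simp
  | cons c l ih =>
    intro groups cur
    simp only [List.foldl_cons, pvStepA]
    by_cases hc : cur = []
    · rw [if_pos hc, if_pos hc]
      exact ih groups (cur ++ [c])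
    · by_cases hg : pvTs c - pvTs ((PySem.List.pyGet? cur (-1)).getD []) > g
      · rw [if_neg hc, if_neg hc, if_pos hg, if_pos hg]
        rw [ih (groups ++ [cur]) [c], ih ([] ++ [cur]) [c]]
        simp [List.append_assoc]
      · rw [if_neg hc, if_neg hc, if_neg hg, if_neg hg]
        exact ih groups (cur ++ [c])

-- current_group stays nonempty once it is nonempty
theorem pv_run_ne (g : Int) (l : List (List (String × Int))) :
    ∀ (cur : List (List (String × Int))), cur ≠ [] →
      (List.foldl (pvStepA g) ([], cur) l).2 ≠ [] := by
  induction l with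
  | nil => intro cur h; simpa using h
  | cons c l ih =>
    intro cur h
    simp only [List.foldl_cons, pvStepA]
    rw [if_neg h]
    by_cases hg : pvTs c - pvTs ((PySem.List.pyGet? cur (-1)).getD []) > g
    · rw [if_pos hg, pv_foldl_stepA_split]
      exact ih [c] (by simp)
    · rw [if_neg hg]
      exact ih (cur ++ [c]) (by simp)

-- how a pending nonempty current_group combines with the groups B builds for the rest
def pvAttach (g : Int) (cur : List (List (String × Int)))
    (groups : List (List (List (String × Int)))) : List (List (List (String × Int))) :=
  match groups with
  | [] => [cur]
  | first :: gs =>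
      if pvTs (first.headD []) - pvTs ((PySem.List.pyGet? cur (-1)).getD []) > g
      then cur :: first :: gs
      else (cur ++ first) :: gs

theorem pv_alt_cons (g : Int) (c : List (String × Int)) (l : List (List (String × Int))) :
    group_chunks_by_gap_py_alt (c :: l) g = pvStepB g (group_chunks_by_gap_py_alt l g) c := by
  simp [group_chunks_by_gap_py_alt, List.foldl_append]

theorem pv_last_singleton (c : List (String × Int)) :
    (PySem.List.pyGet? [c] (-1)).getD [] = c := by
  simp [PySem.List.pyGet?_neg_one]

theorem pv_last_snoc (cur : List (List (String × Int))) (c : List (String × Int)) :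
    (PySem.List.pyGet? (cur ++ [c]) (-1)).getD [] = c := by
  simp [PySem.List.pyGet?_neg_one_append_singleton]

-- unfolding lemmas for pvAttach (avoid leftover match expressions)
theorem pvAttach_nil (g : Int) (cur : List (List (String × Int))) :
    pvAttach g cur [] = [cur] := rfl

theorem pvAttach_cons (g : Int) (cur first : List (List (String × Int)))
    (gs : List (List (List (String × Int)))) :
    pvAttach g cur (first :: gs) =
      if pvTs (first.headD []) - pvTs ((PySem.List.pyGet? cur (-1)).getD []) > g
      then cur :: first :: gs
      else (cur ++ first) :: gs := rfl

theorem pvStepB_cons (g : Int) (first : List (List (String × Int)))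
    (gs : List (List (List (String × Int)))) (c : List (String × Int)) :
    pvStepB g (first :: gs) c =
      if pvTs (first.headD []) - pvTs c ≤ g
      then (c :: first) :: gs
      else [c] :: first :: gs := rfl

-- pushing one more chunk through B's step commutes with attaching the pending group
theorem pv_attach_step (g : Int) (c : List (String × Int)) (cur : List (List (String × Int)))
    (groups : List (List (List (String × Int)))) :
    pvAttach g cur (pvStepB g groups c) =
      if pvTs c - pvTs ((PySem.List.pyGet? cur (-1)).getD []) > g
      then cur :: pvAttach g [c] groups
      else pvAttach g (cur ++ [c]) groups := by
  cases groups with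
  | nil =>
    rw [show pvStepB g [] c = [[c]] from rfl, pvAttach_cons, List.headD_cons,
      pvAttach_nil, pvAttach_nil]
  | cons first gs =>
    rw [pvStepB_cons, pvAttach_cons, pvAttach_cons, pv_last_singleton, pv_last_snoc]
    split_ifs with hb <;>
      rw [pvAttach_cons, List.headD_cons] <;>
      split_ifs <;>
      first
        | rfl
        | (exfalso; omega)
        | simp

-- attaching a fresh single-chunk group is exactly B's step
theorem pv_attach_singleton (g : Int) (c : List (String × Int))
    (groups : List (List (List (String × Int)))) :
    pvAttach g [c] groups = pvStepB g groups c := by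
  cases groups with
  | nil => rfl
  | cons first gs =>
    rw [pvAttach_cons, pv_last_singleton, pvStepB_cons]
    by_cases hb : pvTs (first.headD []) - pvTs c ≤ g
    · rw [if_neg (show ¬ pvTs (first.headD []) - pvTs c > g by omega), if_pos hb]
      simp
    · rw [if_pos (show pvTs (first.headD []) - pvTs c > g by omega), if_neg hb]

-- the main invariant: A's loop from a pending nonempty current_group equals
-- B's grouping of the rest with that group attached in front
theorem pv_main (g : Int) (l : List (List (String × Int))) :
    ∀ (cur : List (List (String × Int))), cur ≠ [] →
      (List.foldl (pvStepA g) ([], cur) l).1 ++ [(List.foldl (pvStepA g) ([], cur) l).2]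
        = pvAttach g cur (group_chunks_by_gap_py_alt l g) := by
  induction l with
  | nil =>
    intro cur h
    simp [group_chunks_by_gap_py_alt, pvAttach]
  | cons c l ih =>
    intro cur h
    rw [pv_alt_cons, pv_attach_step]
    simp only [List.foldl_cons, pvStepA]
    rw [if_neg h]
    by_cases hg : pvTs c - pvTs ((PySem.List.pyGet? cur (-1)).getD []) > g
    · rw [if_pos hg, if_pos hg, pv_foldl_stepA_split, ← ih [c] (by simp)]
      simp
    · rw [if_neg hg, if_neg hg]
      exact ih (cur ++ [c]) (by simp)

-- ===== VERDICT (by name: the statement is the Claim_ definition above) =====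
theorem group_chunks_by_gap_py_spec : Claim_equal_group_chunks_by_gap_py := by
  intro chunks g _ _
  unfold Spec_group_chunks_by_gap_py group_chunks_by_gap_py
  cases chunks with
  | nil => simp [group_chunks_by_gap_py_alt]
  | cons c l =>
    simp only [List.foldl_cons]
    rw [show pvStepA g ([], []) c = ([], [c]) from rfl]
    have hne := pv_run_ne g l [c] (by simp)
    rw [if_pos hne, pv_main g l [c] (by simp), pv_alt_cons, pv_attach_singleton]
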